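-- pv_equiv track=rewrite | github.com/ASSERT-KTH/Mokav | experiments/pynguin/c4b/return-lst/generated_tests/src_2379/9/src_2379.py | func
-- ===== SOURCE A (Python) =====
-- def func(*args):
-- 	ret_values = []
--
-- 	n = int(args[0])
-- 	if (n < 5):
-- 	    ret_values.append(1)
-- 	else:
-- 	    n_str = str(n)
-- 	    nums = list(n_str)
-- 	    nums[0] = str((int(nums[0]) + 1))
-- 	    for i in range(1, len(nums)):
-- 	        nums[i] = '0'
-- 	    n_str = ''
-- 	    for i in nums:
-- 	        n_str += i
-- 	    ret_values.append((int(n_str) - n))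
--
-- 	return ret_values
-- ===== SOURCE B (Python) =====
-- def func(*args):
--     n = int(args[0])
--     if n < 5:
--         return [1]
--     p = 10 ** (len(str(n)) - 1)
--     return [(n // p + 1) * p - n]
-- ===== Notes on version B (the rewrite author's own statement) =====
-- stated objective: simpler
-- what changed: Replaces A's digit-string surgery (list of chars, increment first digit, zero the rest, rejoin and re-parse) by a closed-form arithmetic computation (n//p + 1)*p - n with p a power of ten determined by len(str(n)).
import Mathlib
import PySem

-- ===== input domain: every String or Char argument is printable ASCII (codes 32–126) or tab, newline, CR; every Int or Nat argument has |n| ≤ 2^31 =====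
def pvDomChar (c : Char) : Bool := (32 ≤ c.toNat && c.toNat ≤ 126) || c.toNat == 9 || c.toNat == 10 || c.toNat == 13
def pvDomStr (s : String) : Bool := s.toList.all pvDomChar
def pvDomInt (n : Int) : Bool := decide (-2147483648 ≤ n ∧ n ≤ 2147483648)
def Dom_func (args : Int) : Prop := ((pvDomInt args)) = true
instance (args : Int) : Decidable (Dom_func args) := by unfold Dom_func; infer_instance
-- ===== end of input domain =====

-- B replaces A's digit-string surgery by the closed form (n//p + 1)*p - n, p = 10^(len(str(n))-1); objective: simpler.


-- ===== PORT A =====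
def func (args : Int) : List Int :=
  let n := args                                  -- n = int(args[0]) (identity on an int)
  if n < 5 then [1]
  else
    let nStr := PySem.Int.toChars n              -- n_str = str(n), as chars
    let nums : List (List Char) := nStr.map (fun c => [c])   -- nums = list(n_str) (each cell a Python str)
    -- nums[0] = str(int(nums[0]) + 1); the .getD 0 of the parse is unreachable: nums[0] is one decimal digit
    let nums1 := PySem.List.pySetD nums 0
      (PySem.Int.toChars ((PySem.Int.ofChars? (PySem.List.pyGetD nums 0 [])).getD 0 + 1))
    -- for i in range(1, len(nums)): nums[i] = '0'
    let nums2 := (PySem.List.pyRange 1 (PySem.List.len nums1) 1).foldl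
      (fun l i => PySem.List.pySetD l i ['0']) nums1
    -- n_str = ''; for i in nums: n_str += i
    let joined := nums2.foldl (fun acc i => acc ++ i) ([] : List Char)
    -- int(n_str) - n; the .getD 0 is unreachable: joined is a nonempty digit string
    [(PySem.Int.ofChars? joined).getD 0 - n]

-- ===== PORT B =====
def func_alt (args : Int) : List Int :=
  let n := args                                  -- n = int(args[0])
  if n < 5 then [1]
  else
    let p : Int := 10 ^ ((PySem.Int.toChars n).length - 1)   -- p = 10 ** (len(str(n)) - 1)
    [(PySem.Int.floordiv n p + 1) * p - n]

-- ===== PRECONDITION & SPEC =====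
def Spec_func (args : Int) (out : List Int) : Prop := out = func_alt args
instance (args : Int) (out : List Int) : Decidable (Spec_func args out) := by unfold Spec_func; infer_instance

-- ===== CLAIM (what is proved, stated in full; the proofs are below) =====
def Claim_equal_func : Prop := ∀ (args : Int), Dom_func args → Spec_func args (func args)

-- ===== LEMMAS AND PROOFS =====

-- toDigitsCore appends to its accumulator
lemma pv_tdc_acc : ∀ (f n : Nat) (ds : List Char),
    Nat.toDigitsCore 10 f n ds = Nat.toDigitsCore 10 f n [] ++ ds := by
  intro f
  induction f with
  | zero => intro n ds; simp [Nat.toDigitsCore]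
  | succ f ih =>
    intro n ds
    simp only [Nat.toDigitsCore]
    by_cases h : n / 10 = 0
    · simp [h]
    · simp only [h, if_false]
      rw [ih (n / 10) (Nat.digitChar (n % 10) :: ds), ih (n / 10) [Nat.digitChar (n % 10)]]
      simp

-- fuel irrelevance for sufficient fuel
lemma pv_tdc_fuel : ∀ (n f g : Nat), n < f → n < g →
    Nat.toDigitsCore 10 f n [] = Nat.toDigitsCore 10 g n [] := by
  intro n
  induction n using Nat.strong_induction_on with
  | _ n ih =>
    intro f g hf hg
    match f, g with
    | f + 1, g + 1 =>
      simp only [Nat.toDigitsCore]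
      by_cases h : n / 10 = 0
      · simp [h]
      · simp only [h, if_false]
        rw [pv_tdc_acc f, pv_tdc_acc g]
        have hlt : n / 10 < n := Nat.div_lt_self (Nat.pos_of_ne_zero (by omega)) (by norm_num)
        rw [ih (n / 10) hlt f g (by omega) (by omega)]

lemma pv_toDigits_small (m : Nat) (h : m < 10) :
    Nat.toDigits 10 m = [Nat.digitChar m] := by
  simp [Nat.toDigits, Nat.toDigitsCore, Nat.div_eq_of_lt h, Nat.mod_eq_of_lt h]

lemma pv_toDigits_step (m : Nat) (h : 10 ≤ m) :
    Nat.toDigits 10 m = Nat.toDigits 10 (m / 10) ++ [Nat.digitChar (m % 10)] := by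
  have h0 : m / 10 ≠ 0 := by omega
  have hlt : m / 10 < m := Nat.div_lt_self (by omega) (by norm_num)
  calc Nat.toDigits 10 m
      = Nat.toDigitsCore 10 (m + 1) m [] := rfl
    _ = Nat.toDigitsCore 10 m (m / 10) [Nat.digitChar (m % 10)] := by
        conv_lhs => rw [show m + 1 = m + 1 from rfl]
        simp only [Nat.toDigitsCore, h0, if_false]
    _ = Nat.toDigitsCore 10 m (m / 10) [] ++ [Nat.digitChar (m % 10)] := pv_tdc_acc ..
    _ = Nat.toDigits 10 (m / 10) ++ [Nat.digitChar (m % 10)] := by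
        rw [pv_tdc_fuel (m / 10) m (m / 10 + 1) (by omega) (by omega)]; rfl

-- structure of the decimal representation of a positive Nat
lemma pv_rep_struct : ∀ m : Nat, 0 < m →
    ∃ j, (Nat.toDigits 10 m).length = j + 1 ∧ 10 ^ j ≤ m ∧ m < 10 ^ (j + 1) ∧
      Nat.toDigits 10 m = Nat.digitChar (m / 10 ^ j) :: (Nat.toDigits 10 m).tail := by
  intro m
  induction m using Nat.strong_induction_on with
  | _ m ih =>
    intro hm
    by_cases hs : m < 10
    · refine ⟨0, ?_⟩
      rw [pv_toDigits_small m hs]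
      simp [Nat.lt_succ_iff]; omega
    · rw [not_lt] at hs
      have hlt : m / 10 < m := Nat.div_lt_self (by omega) (by norm_num)
      obtain ⟨j, hlen, hlo, hhi, hhead⟩ := ih (m / 10) hlt (by omega)
      refine ⟨j + 1, ?_, ?_, ?_, ?_⟩
      · rw [pv_toDigits_step m hs]; simp [hlen]
      · calc 10 ^ (j + 1) = 10 ^ j * 10 := by ring
          _ ≤ (m / 10) * 10 := by exact Nat.mul_le_mul_right 10 hlo
          _ ≤ m := by omega
      · have : m < (m / 10 + 1) * 10 := by omega
        calc m < (m / 10 + 1) * 10 := this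
          _ ≤ 10 ^ (j + 1) * 10 := by exact Nat.mul_le_mul_right 10 (by omega)
          _ = 10 ^ (j + 1 + 1) := by ring
      · rw [pv_toDigits_step m hs, hhead]
        have : m / 10 / 10 ^ j = m / 10 ^ (j + 1) := by
          rw [Nat.div_div_eq_div_mul]; ring_nf
        simp [this]

-- the zeroing loop turns pre ++ post into pre ++ ['0']-cells
lemma pv_set_loop : ∀ (post pre : List (List Char)),
    (PySem.List.pyRange (pre.length : Int) ((pre.length : Int) + (post.length : Int)) 1).foldl
        (fun l i => PySem.List.pySetD l i ['0']) (pre ++ post)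
      = pre ++ List.replicate post.length ['0'] := by
  intro post
  induction post with
  | nil => intro pre; simp [PySem.List.pyRange]
  | cons p ps ih =>
    intro pre
    rw [PySem.List.pyRange_one_cons (by simp only [List.length_cons]; push_cast; omega)]
    simp only [List.foldl_cons]
    have hset : PySem.List.pySetD (pre ++ p :: ps) ((pre.length : Int)) (['0'] : List Char)
        = (pre ++ [['0']]) ++ ps := by
      rw [PySem.List.pySetD_natCast]
      simp
    rw [hset]
    have harg : ((pre.length : Int) + 1) = (((pre ++ [['0']]).length : Int)) := by
      simp
    have harg2 : ((pre.length : Int) + ((p :: ps).length : Int))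
        = (((pre ++ [['0']]).length : Int) + ((ps.length : Int))) := by
      simp; ring
    rw [harg, harg2, ih (pre ++ [['0']])]
    simp [List.replicate_succ]

-- folding ++ over the final cell list
lemma pv_join_acc : ∀ (j : Nat) (acc : List Char),
    (List.replicate j (['0'] : List Char)).foldl (fun a i => a ++ i) acc
      = acc ++ List.replicate j '0' := by
  intro j
  induction j with
  | zero => intro acc; simp
  | succ j ih => intro acc; simp [List.replicate_succ, List.foldl_cons, ih]

lemma pv_parse_digit (d : Nat) (h : d ≤ 9) :
    PySem.Int.ofChars? [Nat.digitChar d] = some (d : Int) := by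
  interval_cases d <;> decide

lemma pv_parse_round (d j : Nat) (hd1 : 1 ≤ d) (hd : d ≤ 9) (hj : j ≤ 9) :
    PySem.Int.ofChars? (Nat.toDigits 10 (d + 1) ++ List.replicate j '0')
      = some (((d + 1) * 10 ^ j : Nat) : Int) := by
  interval_cases d <;> interval_cases j <;> decide

-- ===== VERDICT (by name: the statement is the Claim_ definition above) =====
theorem func_spec : Claim_equal_func := by
  intro args hdom
  unfold Spec_func func func_alt
  by_cases h5 : args < 5
  · simp [h5]
  · simp only [h5, if_false]
    have hn0 : (0:Int) ≤ args := by omega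
    have hdomi : args ≤ 2147483648 := by
      simp [Dom_func, pvDomInt] at hdom; omega
    set m := args.toNat with hm
    have hargs : args = (m : Int) := by omega
    have hm5 : 5 ≤ m := by omega
    have hchars : PySem.Int.toChars args = Nat.toDigits 10 m := by
      simp only [PySem.Int.toChars, not_lt.2 hn0, if_false, ← hm]
    obtain ⟨j, hlen, hlo, hhi, hhead⟩ := pv_rep_struct m (by omega)
    set d := m / 10 ^ j with hd
    have hpj : (0:Nat) < 10 ^ j := Nat.pow_pos (by norm_num)
    have hd1 : 1 ≤ d := Nat.one_le_div_iff hpj |>.mpr hlo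
    have hd9 : d ≤ 9 := by
      have : m / 10 ^ j < 10 := Nat.div_lt_iff_lt_mul hpj |>.mpr
        (by rw [pow_succ] at hhi; omega)
      omega
    have hj9 : j ≤ 9 := by
      by_contra hc
      have h10 : (10:Nat) ^ 10 ≤ 10 ^ j := Nat.pow_le_pow_right (by norm_num) (by omega)
      have : (10:Nat) ^ 10 ≤ m := le_trans h10 hlo
      norm_num at this
      omega
    set t := (Nat.toDigits 10 m).tail with htdef
    have ht : Nat.toDigits 10 m = Nat.digitChar d :: t := hhead
    have htlen : t.length = j := by
      have := hlen
      rw [ht] at this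
      simpa using this
    rw [hchars, ht]
    simp only [List.map_cons]
    rw [PySem.List.pyGetD_zero_cons, pv_parse_digit d hd9, Option.getD_some]
    have hdc : PySem.Int.toChars ((d:Int) + 1) = Nat.toDigits 10 (d + 1) := by
      have h1 : ¬ ((d:Int) + 1 < 0) := by omega
      have h2 : ((d:Int) + 1).toNat = d + 1 := by omega
      simp only [PySem.Int.toChars, h1, if_false, h2]
    rw [hdc]
    have hset0 : PySem.List.pySetD ([Nat.digitChar d] :: t.map (fun c => [c])) (0:Int)
        (Nat.toDigits 10 (d + 1)) = Nat.toDigits 10 (d + 1) :: t.map (fun c => [c]) := by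
      have h0 : (0:Int) = ((0:Nat):Int) := rfl
      rw [h0, PySem.List.pySetD_natCast]
      simp
    rw [hset0]
    have hlenint : PySem.List.len (Nat.toDigits 10 (d + 1) :: t.map (fun c => [c]))
        = (1:Int) + (t.map (fun c : Char => [c])).length := by
      rw [PySem.List.len_eq]; simp; ring
    rw [hlenint]
    have hloop := pv_set_loop (t.map (fun c => [c])) [Nat.toDigits 10 (d + 1)]
    simp only [List.length_cons, List.length_nil, Nat.zero_add, Nat.cast_one,
      List.singleton_append] at hloop
    rw [hloop]
    simp only [List.foldl_cons, List.nil_append, List.length_map, htlen]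
    rw [pv_join_acc j (Nat.toDigits 10 (d + 1)), pv_parse_round d j hd1 hd9 hj9,
      Option.getD_some]
    -- B side
    have hlenB : (Nat.digitChar d :: t).length - 1 = j := by simp [htlen]
    rw [hlenB]
    have hp : (10:Int) ^ j = ((10 ^ j : Nat) : Int) := by push_cast; ring
    rw [hp, hargs, PySem.Int.floordiv_natCast, ← hd]
    congr 1
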